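-- pv_equiv track=rewrite | github.com/knitli/codeweaver | src/codeweaver/engine/chunker/delimiter.py | _check_structural_delimiter
-- ===== SOURCE A (Python) =====
-- from typing import TYPE_CHECKING, Any, NamedTuple, cast
--
-- def _check_structural_delimiter(
--     content: str, pos: int, allowed: set[str]
-- ) -> tuple[int, str] | None:
--     """Check if current position has a structural delimiter.
--
--     Args:
--         content: Source code
--         pos: Current position
--         allowed: Set of allowed delimiters
--
--     Returns:
--         (position, delimiter) tuple or None
--     """
--     for struct in sorted(allowed, key=len, reverse=True):
--         struct_len = len(struct)
--         if content[pos : pos + struct_len] == struct: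
--             return pos, cast(str, struct)
--     return None
-- ===== SOURCE B (Python) =====
-- def _check_structural_delimiter(content, pos, allowed):
--     """Check if current position has a structural delimiter.
--
--     One pass over the set with a running best: keep the longest delimiter
--     that matches content at pos (the longest match is unique, so iteration
--     order does not matter), no sorting at all.
--     """
--     best = None
--     for s in allowed:
--         if (best is None or len(best) < len(s)) and content[pos : pos + len(s)] == s:
--             best = s
--     return None if best is None else (pos, best)
-- ===== Notes on version B (the rewrite author's own statement) =====
-- stated objective: alternative
-- what changed: B replaces A's sort-by-length-then-scan with a single unsorted pass keeping a running longest-match accumulator (correct because the longest matching delimiter at pos is unique), eliminating the sort entirely.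
import Mathlib
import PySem

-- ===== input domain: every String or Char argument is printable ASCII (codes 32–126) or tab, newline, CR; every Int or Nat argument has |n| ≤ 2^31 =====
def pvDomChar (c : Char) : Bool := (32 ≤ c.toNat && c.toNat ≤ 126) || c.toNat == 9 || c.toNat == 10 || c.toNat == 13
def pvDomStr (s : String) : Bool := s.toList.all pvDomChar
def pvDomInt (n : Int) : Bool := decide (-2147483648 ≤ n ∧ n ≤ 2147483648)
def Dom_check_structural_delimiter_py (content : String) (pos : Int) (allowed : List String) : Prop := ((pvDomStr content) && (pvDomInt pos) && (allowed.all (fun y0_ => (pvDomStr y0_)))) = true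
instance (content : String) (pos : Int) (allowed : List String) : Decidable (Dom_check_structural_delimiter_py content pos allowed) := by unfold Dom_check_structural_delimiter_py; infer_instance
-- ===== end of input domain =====

-- B replaces A's sort-then-scan with a single unsorted pass keeping a running longest-match
-- accumulator (the longest matching delimiter at pos is unique, so order is irrelevant);
-- objective: alternative.

-- ===== PORT A =====
-- for struct in sorted(allowed, key=len, reverse=True): if content[pos:pos+len(struct)] == struct: return (pos, struct)
def pvScanA (content : String) (pos : Int) : List String → Option (Int × String)
  | [] => none
  | struct :: rest =>
      let structLen := PySem.Str.len struct
      if PySem.Str.slice content (some pos) (some (pos + structLen)) = struct then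
        some (pos, struct)
      else
        pvScanA content pos rest

def check_structural_delimiter_py (content : String) (pos : Int) (allowed : List String) : Option (Int × String) :=
  pvScanA content pos (PySem.List.sorted allowed PySem.Str.len true)

-- ===== PORT B =====
-- best = None; for s in allowed: if (best is None or len(best) < len(s)) and content[pos:pos+len(s)] == s: best = s
def pvGate (best : Option String) (s : String) : Bool :=
  match best with
  | none => true
  | some b => decide (PySem.Str.len b < PySem.Str.len s)

def pvStep (content : String) (pos : Int) (best : Option String) (s : String) : Option String :=
  if pvGate best s = true ∧
      PySem.Str.slice content (some pos) (some (pos + PySem.Str.len s)) = s then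
    some s
  else best

def check_structural_delimiter_py_alt (content : String) (pos : Int) (allowed : List String) : Option (Int × String) :=
  match allowed.foldl (pvStep content pos) none with
  | none => none
  | some b => some (pos, b)

-- ===== PRECONDITION & SPEC =====
def Spec_check_structural_delimiter_py (content : String) (pos : Int) (allowed : List String) (out : Option (Int × String)) : Prop := out = check_structural_delimiter_py_alt content pos allowed
instance (content : String) (pos : Int) (allowed : List String) (out : Option (Int × String)) : Decidable (Spec_check_structural_delimiter_py content pos allowed out) := by unfold Spec_check_structural_delimiter_py; infer_instance

-- ===== CLAIM =====
def Claim_equal_check_structural_delimiter_py : Prop := ∀ (content : String) (pos : Int) (allowed : List String), Dom_check_structural_delimiter_py content pos allowed → Spec_check_structural_delimiter_py content pos allowed (check_structural_delimiter_py content pos allowed)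

-- ===== LEMMAS AND PROOFS =====

-- the slice content[pos : pos + L]
def pvSeg (content : String) (pos L : Int) : String :=
  PySem.Str.slice content (some pos) (some (pos + L))

theorem pvScanA_eq_none_iff (content : String) (pos : Int) (l : List String) :
    pvScanA content pos l = none ↔ ∀ s ∈ l, pvSeg content pos (PySem.Str.len s) ≠ s := by
  induction l with
  | nil => simp [pvScanA]
  | cons h t ih =>
      simp only [pvScanA, pvSeg] at *
      split_ifs with hm
      · simp only [false_iff]
        intro hall; exact hall h (List.mem_cons_self) hm
      · simp only [ih, List.mem_cons]
        constructor
        · rintro hall s (rfl | hs)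
          · exact hm
          · exact hall s hs
        · intro hall s hs; exact hall s (Or.inr hs)

theorem pvScanA_eq_some (content : String) (pos : Int) (l : List String)
    (hpair : l.Pairwise (fun a b => PySem.Str.len b ≤ PySem.Str.len a))
    (r : Int × String) (h : pvScanA content pos l = some r) :
    ∃ s, r = (pos, s) ∧ s ∈ l ∧ pvSeg content pos (PySem.Str.len s) = s ∧
      ∀ t ∈ l, pvSeg content pos (PySem.Str.len t) = t → PySem.Str.len t ≤ PySem.Str.len s := by
  induction l with
  | nil => simp [pvScanA] at h
  | cons hd t ih =>
      simp only [pvScanA, pvSeg] at h ⊢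
      rcases List.pairwise_cons.mp hpair with ⟨hhd, htail⟩
      split_ifs at h with hm
      · refine ⟨hd, by simpa using h.symm, List.mem_cons_self, hm, ?_⟩
        intro tt htt _
        rcases List.mem_cons.mp htt with rfl | htt'
        · exact le_refl _
        · exact hhd tt htt'
      · rcases ih htail h with ⟨s, hr, hmem, hseg, hmax⟩
        refine ⟨s, hr, List.mem_cons_of_mem _ hmem, hseg, ?_⟩
        intro tt htt hsegt
        rcases List.mem_cons.mp htt with rfl | htt'
        · exact absurd hsegt hm
        · exact hmax tt htt' hsegt

theorem pvFold_eq_none_iff (content : String) (pos : Int) (l : List String) (acc : Option String) :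
    l.foldl (pvStep content pos) acc = none ↔
      acc = none ∧ ∀ s ∈ l, pvSeg content pos (PySem.Str.len s) ≠ s := by
  induction l generalizing acc with
  | nil => simp
  | cons s t ih =>
      simp only [List.foldl_cons, ih, List.mem_cons]
      constructor
      · rintro ⟨hstep, htail⟩
        unfold pvStep at hstep
        split_ifs at hstep with hc
        subst hstep
        refine ⟨rfl, ?_⟩
        rintro x (rfl | hx)
        · intro hmx
          exact hc ⟨by simp [pvGate], by simpa [pvSeg] using hmx⟩
        · exact htail x hx
      · rintro ⟨rfl, hall⟩
        have hs := hall s (Or.inl rfl)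
        refine ⟨?_, fun x hx => hall x (Or.inr hx)⟩
        unfold pvStep
        split_ifs with hc
        · exact absurd (by simpa [pvSeg] using hc.2) hs
        · rfl

theorem pvFold_eq_some (content : String) (pos : Int) (l : List String) (acc : Option String)
    (hacc : ∀ a, acc = some a → pvSeg content pos (PySem.Str.len a) = a)
    (b : String) (h : l.foldl (pvStep content pos) acc = some b) :
    pvSeg content pos (PySem.Str.len b) = b ∧ (b ∈ l ∨ acc = some b) ∧
      (∀ s ∈ l, pvSeg content pos (PySem.Str.len s) = s → PySem.Str.len s ≤ PySem.Str.len b) ∧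
      (∀ a, acc = some a → PySem.Str.len a ≤ PySem.Str.len b) := by
  induction l generalizing acc with
  | nil =>
      simp only [List.foldl_nil] at h
      exact ⟨hacc b h, Or.inr h, by simp, fun a ha => by rw [ha] at h; cases h; exact le_refl _⟩
  | cons s t ih =>
      simp only [List.foldl_cons] at h
      by_cases hc : pvGate acc s = true ∧
          PySem.Str.slice content (some pos) (some (pos + PySem.Str.len s)) = s
      · have hstep : pvStep content pos acc s = some s := by unfold pvStep; rw [if_pos hc]
        rw [hstep] at h
        have hacc' : ∀ a, (some s : Option String) = some a →
            pvSeg content pos (PySem.Str.len a) = a := by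
          rintro a ha; cases ha; simpa [pvSeg] using hc.2
        rcases ih (some s) hacc' h with ⟨hb, hmem, hmaxt, haccle⟩
        have hsle : PySem.Str.len s ≤ PySem.Str.len b := haccle s rfl
        refine ⟨hb, ?_, ?_, ?_⟩
        · rcases hmem with hbt | hbs
          · exact Or.inl (List.mem_cons_of_mem _ hbt)
          · cases hbs; exact Or.inl List.mem_cons_self
        · rintro x hx hmx
          rcases List.mem_cons.mp hx with rfl | hx'
          · exact hsle
          · exact hmaxt x hx' hmx
        · rintro a ha
          have : pvGate acc s = true := hc.1
          rw [ha] at this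
          simp only [pvGate, decide_eq_true_eq] at this
          exact le_of_lt (lt_of_lt_of_le this hsle)
      · have hstep : pvStep content pos acc s = acc := by unfold pvStep; rw [if_neg hc]
        rw [hstep] at h
        rcases ih acc hacc h with ⟨hb, hmem, hmaxt, haccle⟩
        refine ⟨hb, ?_, ?_, haccle⟩
        · rcases hmem with hbt | hba
          · exact Or.inl (List.mem_cons_of_mem _ hbt)
          · exact Or.inr hba
        · rintro x hx hmx
          rcases List.mem_cons.mp hx with rfl | hx'
          · -- x = s matches but the step did not take it: the gate must be false
            by_cases hg : pvGate acc x = true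
            · exact absurd ⟨hg, by simpa [pvSeg] using hmx⟩ hc
            · cases hacc0 : acc with
              | none => rw [hacc0] at hg; simp [pvGate] at hg
              | some a =>
                  rw [hacc0] at hg
                  simp only [pvGate, decide_eq_true_eq] at hg
                  exact le_trans (le_of_not_gt hg) (haccle a hacc0)

          · exact hmaxt x hx' hmx

theorem check_structural_delimiter_py_eq (content : String) (pos : Int) (allowed : List String) :
    check_structural_delimiter_py content pos allowed
      = check_structural_delimiter_py_alt content pos allowed := by
  unfold check_structural_delimiter_py check_structural_delimiter_py_alt
  set lA := PySem.List.sorted allowed PySem.Str.len true with hlA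
  have hmemA : ∀ s, s ∈ lA ↔ s ∈ allowed := fun s => PySem.List.mem_sorted _ _ _ _
  cases hA : pvScanA content pos lA with
  | none =>
      have hAll := (pvScanA_eq_none_iff content pos lA).mp hA
      have hfold : allowed.foldl (pvStep content pos) none = none := by
        rw [pvFold_eq_none_iff]
        exact ⟨rfl, fun s hs => hAll s ((hmemA s).mpr hs)⟩
      rw [hfold]
  | some r =>
      rcases pvScanA_eq_some content pos lA (PySem.List.sorted_pairwise_rev allowed PySem.Str.len)
        r hA with ⟨s, hr, hmem, hseg, hmaxA⟩
      have hsallowed : s ∈ allowed := (hmemA s).mp hmem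
      cases hB : allowed.foldl (pvStep content pos) none with
      | none =>
          rcases (pvFold_eq_none_iff content pos allowed none).mp hB with ⟨_, hnone⟩
          exact absurd hseg (hnone s hsallowed)
      | some b =>
          rcases pvFold_eq_some content pos allowed none (by simp) b hB with
            ⟨hbm, hbmem, hmaxB, _⟩
          have hble : PySem.Str.len b ≤ PySem.Str.len s := by
            rcases hbmem with hbmem | hbad
            · exact hmaxA b ((hmemA b).mpr hbmem) hbm
            · cases hbad
          have hsle : PySem.Str.len s ≤ PySem.Str.len b := hmaxB s hsallowed hseg
          have hlen : PySem.Str.len b = PySem.Str.len s := le_antisymm hble hsle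
          have : b = s := by rw [← hbm, hlen, hseg]
          rw [hr, this]

-- ===== VERDICT =====
theorem check_structural_delimiter_py_spec : Claim_equal_check_structural_delimiter_py := by
  intro content pos allowed _
  unfold Spec_check_structural_delimiter_py
  exact check_structural_delimiter_py_eq content pos allowed
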